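-- pv_equiv track=rewrite | github.com/shahzebnaqvi/Brolang | helper_functions.py | check_end_of_string
-- ===== SOURCE A (Python) =====
-- def check_end_of_string(string: str):
--     string = string[1:]  # removing first quotation mark
--     str_len = len(string)
--     iterator = 0
--     while iterator < str_len:
--         if(string[0] == "\\"):  # if char is backslash remove it and next char as it will have special meaning and can not end string
--             string = string[2:]
--             iterator += 2
--         if(len(string) == 1 and string == "\""):
--             return True
--         else:
--             string = string[1:]
--             iterator += 1
--     return False
-- ===== SOURCE B (Python) =====
-- def check_end_of_string(string: str):
--     # Single index pointer over the original string: no slicing, O(n).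
--     n = len(string)
--     i = 1  # skip opening quotation mark
--     while i < n:
--         if string[i] == "\\":
--             i += 2  # backslash escapes the next char (A also drops one more below)
--         if i == n - 1 and string[i] == "\"":
--             return True
--         i += 1
--     return False
-- ===== Notes on version B (the rewrite author's own statement) =====
-- stated objective: faster
-- what changed: Replaces A's repeated front-slicing of the string (each while-iteration builds new substrings) by a single integer index pointer scanning the original string once.
import Mathlib
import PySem

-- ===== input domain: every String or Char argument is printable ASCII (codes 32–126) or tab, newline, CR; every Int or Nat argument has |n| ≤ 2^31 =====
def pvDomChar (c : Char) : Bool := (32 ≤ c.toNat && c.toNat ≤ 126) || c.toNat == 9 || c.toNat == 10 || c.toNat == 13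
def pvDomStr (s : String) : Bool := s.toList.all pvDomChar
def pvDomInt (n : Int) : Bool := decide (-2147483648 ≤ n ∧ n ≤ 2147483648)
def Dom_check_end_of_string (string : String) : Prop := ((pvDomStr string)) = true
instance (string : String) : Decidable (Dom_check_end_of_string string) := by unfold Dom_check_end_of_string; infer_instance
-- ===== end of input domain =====

-- B replaces A's repeated front-slicing of the string by a single index pointer
-- over the original string: one linear pass instead of a new substring per step.

-- ===== PORT A =====
-- Transliteration of A's while-loop; the mutable `string` is the List Char state
-- (Python slices s[1:]/s[2:] on nonnegative bounds are exactly List.drop).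
-- string[0] is read via headD: at every loop entry iterator < strLen guarantees
-- the list is nonempty in Python (len ≥ strLen - iterator), so the default is never used.
def pvALoop (s : List Char) (iterator strLen : Int) : Bool :=
  if iterator < strLen then
    let s1 := if s.headD ' ' = '\\' then s.drop 2 else s
    let it1 := if s.headD ' ' = '\\' then iterator + 2 else iterator
    if s1.length = 1 ∧ s1 = ['"'] then true
    else pvALoop (s1.drop 1) (it1 + 1) strLen
  else false
termination_by (strLen - iterator).toNat
decreasing_by split <;> omega

def check_end_of_string (string : String) : Bool :=
  let s := string.toList.drop 1          -- string = string[1:]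
  pvALoop s 0 (s.length : Int)           -- str_len = len(string); iterator = 0

-- ===== PORT B =====
-- Transliteration of Source B: fixed string, moving index i; string[i] via pyGet?
-- (in Source B every access is guarded to be in range, so pyGet? always yields some).
def pvBLoop (s : List Char) (i n : Int) : Bool :=
  if i < n then
    let i1 := if PySem.List.pyGet? s i = some '\\' then i + 2 else i
    if i1 = n - 1 ∧ PySem.List.pyGet? s i1 = some '"' then true
    else pvBLoop s (i1 + 1) n
  else false
termination_by (n - i).toNat
decreasing_by split <;> omega

def check_end_of_string_alt (string : String) : Bool :=
  pvBLoop string.toList 1 (string.toList.length : Int)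

-- ===== PRECONDITION & SPEC =====
def Spec_check_end_of_string (string : String) (out : Bool) : Prop := out = check_end_of_string_alt string
instance (string : String) (out : Bool) : Decidable (Spec_check_end_of_string string out) := by unfold Spec_check_end_of_string; infer_instance

-- ===== CLAIM (what is proved, stated in full; the proofs are below) =====
def Claim_equal_check_end_of_string : Prop := ∀ (string : String), Dom_check_end_of_string string → Spec_check_end_of_string string (check_end_of_string string)

-- ===== LEMMAS AND PROOFS =====

-- A's loop-exit test "remaining suffix is exactly [\"]" in terms of the fixed list and index.
theorem condA_iff (t : List Char) (m : Nat) :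
    ((t.drop m).length = 1 ∧ t.drop m = ['"']) ↔ (t.length = m + 1 ∧ t[m]? = some '"') := by
  constructor
  · rintro ⟨h1, h2⟩
    have hl : t.length - m = 1 := by simpa using h1
    refine ⟨by omega, ?_⟩
    have : (t.drop m)[0]? = some '"' := by rw [h2]; rfl
    simpa [List.getElem?_drop] using this
  · rintro ⟨h1, h2⟩
    have hl : (t.drop m).length = 1 := by simp [h1]
    refine ⟨hl, ?_⟩
    obtain ⟨a, ha⟩ := List.length_eq_one_iff.mp hl
    have : (t.drop m)[0]? = some '"' := by simpa [List.getElem?_drop] using h2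
    rw [ha] at this ⊢
    simpa using this

-- Invariant tying the two loops: A's shrinking suffix at iterator k is B's index k+1
-- into the full string c :: t.
theorem pvLoop_bridge (t : List Char) (c : Char) (k : Nat) :
    pvALoop (t.drop k) (k : Int) (t.length : Int) =
      pvBLoop (c :: t) ((k : Int) + 1) ((t.length : Int) + 1) := by
  rw [pvALoop, pvBLoop]
  by_cases h : (k : Int) < (t.length : Int)
  · have hk : k < t.length := by exact_mod_cast h
    have h' : (k : Int) + 1 < (t.length : Int) + 1 := by omega
    have hd : (t.drop k).headD ' ' = t[k] := by
      have : (t.drop k)[0]? = some t[k] := by simp [List.getElem?_drop, hk]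
      simp [List.head?_eq_getElem?, this]
    have hget : PySem.List.pyGet? (c :: t) ((k : Int) + 1) = t[k]? := by
      rw [PySem.List.pyGet?_cons_succ, PySem.List.pyGet?_natCast]
    rw [if_pos h, if_pos h']
    by_cases hx : t[k] = '\\'
    · -- escape branch: both sides advance by 2, then test, then by 1 more
      have hg : PySem.List.pyGet? (c :: t) ((k : Int) + 1) = some '\\' := by
        rw [hget]; simp [hk, hx]
      simp only [hd, hx, hg, if_true, List.drop_drop]
      have hcond : ((t.drop (k + 2)).length = 1 ∧ t.drop (k + 2) = ['"']) ↔
          ((k : Int) + 1 + 2 = (t.length : Int) + 1 - 1 ∧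
            PySem.List.pyGet? (c :: t) ((k : Int) + 1 + 2) = some '"') := by
        rw [condA_iff]
        have : (k : Int) + 1 + 2 = ((k + 2 : Nat) : Int) + 1 := by push_cast; ring
        rw [this, PySem.List.pyGet?_cons_succ, PySem.List.pyGet?_natCast]
        constructor
        · rintro ⟨h1, h2⟩; exact ⟨by omega, by simpa [Nat.add_comm] using h2⟩
        · rintro ⟨h1, h2⟩; exact ⟨by omega, by simpa [Nat.add_comm] using h2⟩
      by_cases hc : (t.drop (k + 2)).length = 1 ∧ t.drop (k + 2) = ['"']
      · rw [if_pos hc, if_pos (hcond.mp hc)]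
      · rw [if_neg hc, if_neg (fun hh => hc (hcond.mpr hh))]
        have e2 : (k : Int) + 2 + 1 = ((k + 3 : Nat) : Int) := by push_cast; ring
        have e3 : (k : Int) + 1 + 2 + 1 = ((k + 3 : Nat) : Int) + 1 := by push_cast; ring
        rw [e2, e3]
        exact pvLoop_bridge t c (k + 3)
    · -- plain branch: both sides test, then advance by 1
      have hg : ¬ PySem.List.pyGet? (c :: t) ((k : Int) + 1) = some '\\' := by
        rw [hget]; simp [hk, hx]
      simp only [hd, hx, hg, if_false]
      have hcond : ((t.drop k).length = 1 ∧ t.drop k = ['"']) ↔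
          ((k : Int) + 1 = (t.length : Int) + 1 - 1 ∧
            PySem.List.pyGet? (c :: t) ((k : Int) + 1) = some '"') := by
        rw [condA_iff, hget]
        constructor
        · rintro ⟨h1, h2⟩; exact ⟨by omega, h2⟩
        · rintro ⟨h1, h2⟩; exact ⟨by omega, h2⟩
      by_cases hc : (t.drop k).length = 1 ∧ t.drop k = ['"']
      · rw [if_pos hc, if_pos (hcond.mp hc)]
      · rw [if_neg hc, if_neg (fun hh => hc (hcond.mpr hh))]
        have e1 : List.drop 1 (List.drop k t) = List.drop (k + 1) t := by
          rw [List.drop_drop, Nat.add_comm]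
        have e2 : (k : Int) + 1 = ((k + 1 : Nat) : Int) := by push_cast; ring
        rw [e1, e2]
        exact pvLoop_bridge t c (k + 1)
  · have h' : ¬ ((k : Int) + 1 < (t.length : Int) + 1) := by omega
    rw [if_neg h, if_neg h']
termination_by t.length - k
decreasing_by all_goals omega

-- ===== VERDICT (by name: the statement is the Claim_ definition above) =====
theorem check_end_of_string_spec : Claim_equal_check_end_of_string := by
  intro string _
  unfold Spec_check_end_of_string check_end_of_string check_end_of_string_alt
  cases h : string.toList with
  | nil => rw [pvALoop, pvBLoop]; norm_num
  | cons c t =>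
      have := pvLoop_bridge t c 0
      simpa using this
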